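-- pv_equiv track=rewrite | github.com/Thomaltarix/My_PGP | src/aes/KeyExpansion.py | rev_expandedkey
-- ===== SOURCE A (Python) =====
-- def rev_expandedkey(keyExpanded):
--     keys = [keyExpanded[i:i+16] for i in range(0, len(keyExpanded), 16)]
--     keys = keys[::-1]
--     res = []
--     for i in range(len(keys)):
--         for k in keys[i]:
--             res.append(k)
--     return res
-- ===== SOURCE B (Python) =====
-- def rev_expandedkey(keyExpanded):
--     rev = []            # the answer, built back-to-front
--     chunk = []          # current 16-byte chunk
--     for k in keyExpanded:
--         chunk.append(k)
--         if len(chunk) == 16: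
--             for x in reversed(chunk):
--                 rev.append(x)
--             chunk = []
--     for x in reversed(chunk):
--         rev.append(x)
--     rev.reverse()
--     return rev
-- ===== Notes on version B (the rewrite author's own statement) =====
-- stated objective: alternative
-- what changed: Instead of slicing the key into a list of 16-byte blocks, reversing that list and flattening it with nested loops, B builds the answer back-to-front in one element-wise forward scan: each completed chunk is appended in reversed element order to a reversed accumulator, and one final in-place reverse yields the result, with no slicing and no intermediate block list.
import Mathlib
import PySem

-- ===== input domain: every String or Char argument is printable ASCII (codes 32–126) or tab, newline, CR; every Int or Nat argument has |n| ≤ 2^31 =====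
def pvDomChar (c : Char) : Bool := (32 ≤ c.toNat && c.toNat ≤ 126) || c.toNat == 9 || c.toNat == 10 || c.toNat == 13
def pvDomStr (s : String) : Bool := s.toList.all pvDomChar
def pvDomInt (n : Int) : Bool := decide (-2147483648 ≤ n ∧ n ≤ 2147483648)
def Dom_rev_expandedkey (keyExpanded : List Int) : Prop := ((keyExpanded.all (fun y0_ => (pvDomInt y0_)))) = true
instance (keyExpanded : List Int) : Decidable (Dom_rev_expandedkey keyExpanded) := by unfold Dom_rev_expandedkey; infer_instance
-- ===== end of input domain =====

-- B replaces the slice-chunk/reverse/flatten pipeline by one element-wise forward scan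
-- that builds the answer back-to-front (completed chunks appended in reversed element
-- order, one final reverse) (objective: alternative decomposition, same cost class).

-- ===== PORT A =====
def rev_expandedkey (keyExpanded : List Int) : List Int :=
  -- keys = [keyExpanded[i:i+16] for i in range(0, len(keyExpanded), 16)]
  let keys := (PySem.List.pyRange 0 (PySem.List.len keyExpanded) 16).map
    (fun i => PySem.List.slice keyExpanded (some i) (some (i + 16)))
  -- keys = keys[::-1]   (step -1 never raises; slice? is some here)
  let keys := (PySem.List.slice? keys none none (-1)).getD []
  -- for i in range(len(keys)): for k in keys[i]: res.append(k)
  (PySem.List.pyRange 0 (PySem.List.len keys)).foldl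
    (fun res i => (PySem.List.pyGetD keys i []).foldl (fun res k => res ++ [k]) res) []

-- ===== PORT B =====
-- loop body: chunk.append(k); if len(chunk) == 16: for x in reversed(chunk): rev.append(x); chunk = []
def altStep (st : List Int × List Int) (k : Int) : List Int × List Int :=
  let chunk := st.2 ++ [k]
  if chunk.length = 16 then (chunk.reverse.foldl (fun r x => r ++ [x]) st.1, []) else (st.1, chunk)

def rev_expandedkey_alt (keyExpanded : List Int) : List Int :=
  let st := keyExpanded.foldl altStep ([], [])
  -- for x in reversed(chunk): rev.append(x)
  let rev := st.2.reverse.foldl (fun r x => r ++ [x]) st.1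
  -- rev.reverse(); return rev
  rev.reverse

-- ===== PRECONDITION & SPEC =====
def Spec_rev_expandedkey (keyExpanded : List Int) (out : List Int) : Prop := out = rev_expandedkey_alt keyExpanded
instance (keyExpanded : List Int) (out : List Int) : Decidable (Spec_rev_expandedkey keyExpanded out) := by unfold Spec_rev_expandedkey; infer_instance

-- ===== CLAIM (what is proved, stated in full; the proofs are below) =====
def Claim_equal_rev_expandedkey : Prop := ∀ (keyExpanded : List Int), Dom_rev_expandedkey keyExpanded → Spec_rev_expandedkey keyExpanded (rev_expandedkey keyExpanded)

-- ===== LEMMAS AND PROOFS =====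

-- the 16-element block starting at index s, and the backward concatenation of blocks k, k-1, …, 0
def pvChunk (xs : List Int) (s : Nat) : List Int :=
  PySem.List.slice xs (some (s : Int)) (some ((s : Int) + 16))

def pvDown (xs : List Int) : Nat → List Int
  | 0 => pvChunk xs 0
  | k + 1 => pvChunk xs (16 * (k + 1)) ++ pvDown xs k

-- the list of 16-element chunks of xs, front to back
def chunks16 : List Int → List (List Int)
  | [] => []
  | x :: t => ((x :: t).take 16) :: chunks16 ((x :: t).drop 16)
termination_by xs => xs.length
decreasing_by simp

theorem pvChunk_eq (xs : List Int) (s : Nat) : pvChunk xs s = (xs.drop s).take 16 := by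
  have : ((s : Int) + 16) = ((s : Int) + ((16 : Nat) : Int)) := by norm_num
  rw [pvChunk, this, PySem.List.slice_natCast_add]

theorem chunks16_cons16 (c t : List Int) (h : c.length = 16) :
    chunks16 (c ++ t) = c :: chunks16 t := by
  match c, h with
  | x :: c', h =>
    rw [List.cons_append, chunks16]
    have h' : (x :: c').length = 16 := h
    rw [← List.cons_append, List.take_append_of_le_length (by omega),
      List.drop_append_of_le_length (by omega),
      List.take_of_length_le (by omega), List.drop_eq_nil_of_le (by omega),
      List.nil_append]

theorem chunks16_eq : ∀ (n : ℕ) (xs : List Int), xs.length = n → xs ≠ [] →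
    chunks16 xs = (List.range ((xs.length - 1) / 16 + 1)).map (fun k => pvChunk xs (16 * k)) := by
  intro n
  induction n using Nat.strong_induction_on with
  | _ n ih =>
    intro xs hn hne
    match xs, hne with
    | x :: t, _ =>
      rw [chunks16]
      by_cases hle : (x :: t).length ≤ 16
      · have h0 : ((x :: t).length - 1) / 16 = 0 := by omega
        rw [List.drop_eq_nil_of_le hle, h0]
        simp [chunks16, pvChunk_eq]
      · have hlen : ((x :: t).drop 16).length = (x :: t).length - 16 := by simp
        have hq : (((x :: t).drop 16).length - 1) / 16 + 1 = ((x :: t).length - 1) / 16 := by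
          rw [hlen]; omega
        rw [ih ((x :: t).length - 16) (by omega) _ hlen
              (by apply List.length_pos_iff.mp; rw [hlen]; omega), hq]
        have : ((x :: t).length - 1) / 16 + 1 = (((x :: t).length - 1) / 16 - 1) + 1 + 1 := by
          omega
        rw [this, List.range_succ_eq_map, List.map_cons, List.map_map, ← hq, hlen]
        congr 1
        · simp [pvChunk_eq]
        · apply List.map_congr_left
          intro k _
          simp only [Function.comp, pvChunk_eq, List.drop_drop]
          congr 2
          omega

theorem flatten_rev_chunks (xs : List Int) (q : Nat) :
    ((List.range (q + 1)).map (fun k => pvChunk xs (16 * k))).reverse.flatten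
      = pvDown xs q := by
  induction q with
  | zero => simp [pvDown]
  | succ q ih =>
    rw [List.range_succ]
    simp only [List.map_append, List.reverse_append, List.map_cons, List.map_nil,
      List.reverse_cons, List.reverse_nil, List.nil_append, List.cons_append,
      List.flatten_cons, ih]
    rfl

theorem rev_expandedkey_eq_down (xs : List Int) (h : xs.length ≠ 0) :
    rev_expandedkey xs = pvDown xs ((xs.length - 1) / 16) := by
  simp only [rev_expandedkey]
  have hlen : PySem.List.len xs = (xs.length : Int) := rfl
  have hpos : (0 : Int) < (xs.length : Int) := by exact_mod_cast Nat.pos_of_ne_zero h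
  -- the block-start range is 0, 16, …, 16·q
  have hcount : ((((xs.length : Int)) - 0 + 16 - 1) / 16).toNat = (xs.length - 1) / 16 + 1 := by
    have : ((xs.length : Int) - 0 + 16 - 1) = ((xs.length - 1 + 16 : Nat) : Int) := by
      push_cast; omega
    rw [this, show ((16 : Int)) = ((16 : Nat) : Int) from rfl, Int.ofNat_ediv_ofNat,
      Int.toNat_natCast]
    omega
  have hrange : PySem.List.pyRange 0 (PySem.List.len xs) 16
      = (List.range ((xs.length - 1) / 16 + 1)).map (fun k => ((16 * k : Nat) : Int)) := by
    rw [hlen, PySem.List.pyRange_of_pos 0 (xs.length : Int) (by norm_num)]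
    rw [if_pos hpos, hcount]
    apply List.map_congr_left
    intro k _
    push_cast; ring
  rw [hrange, List.map_map]
  have hchunks : ((List.range ((xs.length - 1) / 16 + 1)).map
      ((fun i => PySem.List.slice xs (some i) (some (i + 16))) ∘ (fun k => ((16 * k : Nat) : Int))))
      = (List.range ((xs.length - 1) / 16 + 1)).map (fun k => pvChunk xs (16 * k)) := by
    apply List.map_congr_left
    intro k _
    simp [Function.comp, pvChunk]
  rw [hchunks]
  rw [PySem.List.slice?_none_none_neg_one, Option.getD_some]
  -- inner loop: res ++ keys[i]; outer loop: flatten in index order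
  have hinner : (fun (res : List Int) (i : Int) =>
        ((PySem.List.pyGetD ((List.range ((xs.length - 1) / 16 + 1)).map (fun k => pvChunk xs (16 * k))).reverse i []).foldl
          (fun res k => res ++ [k]) res))
      = (fun res i => res ++ PySem.List.pyGetD ((List.range ((xs.length - 1) / 16 + 1)).map (fun k => pvChunk xs (16 * k))).reverse i []) := by
    funext res i
    exact PySem.List.foldl_append_singleton_eq_self _ _
  rw [hinner, PySem.List.foldl_append_eq_flatMap, List.nil_append, List.flatMap_def,
    PySem.List.map_pyGetD_pyRange_zero]
  exact flatten_rev_chunks xs _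

-- B's loop invariant: with a partial chunk of fewer than 16 bytes in hand, finishing the
-- scan over xs and flushing the last chunk appends the element-reversed chunks of
-- (chunk ++ xs), in order, after rev
theorem foldl_altStep : ∀ (xs rev chunk : List Int), chunk.length < 16 →
    (let st := xs.foldl altStep (rev, chunk);
     st.2.reverse.foldl (fun r x => r ++ [x]) st.1)
      = rev ++ ((chunks16 (chunk ++ xs)).map List.reverse).flatten := by
  intro xs
  induction xs with
  | nil =>
    intro rev chunk hlt
    match chunk with
    | [] => simp [chunks16]
    | x :: c =>
      rw [List.append_nil, chunks16, List.take_of_length_le (by omega),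
        List.drop_eq_nil_of_le (by omega)]
      simp only [List.foldl_nil, chunks16, List.map_cons, List.map_nil, List.flatten_cons,
        List.flatten_nil, List.append_nil]
      exact PySem.List.foldl_append_singleton_eq_self _ _
  | cons k t ih =>
    intro rev chunk hlt
    simp only [List.foldl_cons]
    rw [show altStep (rev, chunk) k
        = (if (chunk ++ [k]).length = 16
           then ((chunk ++ [k]).reverse.foldl (fun r x => r ++ [x]) rev, ([] : List Int))
           else (rev, chunk ++ [k])) from rfl]
    have hsplit : chunk ++ k :: t = (chunk ++ [k]) ++ t := by simp
    by_cases h16 : (chunk ++ [k]).length = 16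
    · rw [if_pos h16]
      rw [ih _ [] (by simp), PySem.List.foldl_append_singleton_eq_self]
      rw [hsplit, chunks16_cons16 _ _ h16]
      simp
    · rw [if_neg h16]
      rw [ih rev (chunk ++ [k]) (by simp at h16 ⊢; omega), hsplit]

theorem alt_eq_chunks (xs : List Int) :
    rev_expandedkey_alt xs = (chunks16 xs).reverse.flatten := by
  have h := foldl_altStep xs [] [] (by simp)
  simp only [rev_expandedkey_alt, h, List.nil_append]
  rw [List.reverse_flatten, List.map_map]
  simp

-- ===== VERDICT (by name: the statement is the Claim_ definition above) =====
theorem rev_expandedkey_spec : Claim_equal_rev_expandedkey := by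
  intro xs _
  unfold Spec_rev_expandedkey
  rw [alt_eq_chunks]
  by_cases h : xs = []
  · subst h; rw [show chunks16 [] = [] from by rw [chunks16]]; rfl
  · have hne : xs.length ≠ 0 := by simpa [List.length_eq_zero_iff] using h
    rw [rev_expandedkey_eq_down xs hne,
      chunks16_eq xs.length xs rfl h, flatten_rev_chunks]
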